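-- pv_equiv track=rewrite | github.com/clopnaz/aoc2024 | 17/solution.py | minimachine3
-- ===== SOURCE A (Python) =====
-- answer = (2,4,1,7,7,5,0,3,4,0,1,7,5,5,3,0)
--
-- def update_state(A, B, C):
--     B = A % 8
--     B = B ^ 7
--     # C = A // 2**B
--     C = A >> B
--     A = A >> 3
--     B = B ^ C
--     B = B ^ 7
--     return A,B,C
--
-- def minimachine3(A, B=0, C=0):
--     index = 0
--     while True:
--         A,B,C = update_state(A,B,C)
--         out = B % 8
--         if index < len(answer) and out == answer[index]:
--             yield(out)
--             index+=1
--         else: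
--             break
-- ===== SOURCE B (Python) =====
-- answer = (2, 4, 1, 7, 7, 5, 0, 3, 4, 0, 1, 7, 5, 5, 3, 0)
--
--
-- def minimachine3(A, B=0, C=0):
--     # B and C are dead parameters (the VM overwrites them before use).
--     # Stateless reformulation: the k-th raw output depends only on A >> (3*k),
--     # so compute all len(answer) candidate outputs by closed form (random access,
--     # no threaded machine state), then find the first mismatch with the target
--     # and yield exactly that matching prefix.
--     def out_at(k):
--         a = A >> (3 * k)
--         b = (a % 8) ^ 7
--         return (b ^ (a >> b) ^ 7) % 8
--
--     outs = [out_at(k) for k in range(len(answer))]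
--     n = next((i for i, (o, t) in enumerate(zip(outs, answer)) if o != t),
--              len(answer))
--     yield from outs[:n]
-- ===== Notes on version B (the rewrite author's own statement) =====
-- stated objective: alternative
-- what changed: Replaced A's single stateful loop (threading the machine registers step by step, with an index counter into the target) by a stateless closed form — output k depends only on A >> (3*k) — computed for all 16 indices in one pass, followed by a separate pass locating the first mismatch with the target tuple and yielding that prefix.
import Mathlib
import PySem

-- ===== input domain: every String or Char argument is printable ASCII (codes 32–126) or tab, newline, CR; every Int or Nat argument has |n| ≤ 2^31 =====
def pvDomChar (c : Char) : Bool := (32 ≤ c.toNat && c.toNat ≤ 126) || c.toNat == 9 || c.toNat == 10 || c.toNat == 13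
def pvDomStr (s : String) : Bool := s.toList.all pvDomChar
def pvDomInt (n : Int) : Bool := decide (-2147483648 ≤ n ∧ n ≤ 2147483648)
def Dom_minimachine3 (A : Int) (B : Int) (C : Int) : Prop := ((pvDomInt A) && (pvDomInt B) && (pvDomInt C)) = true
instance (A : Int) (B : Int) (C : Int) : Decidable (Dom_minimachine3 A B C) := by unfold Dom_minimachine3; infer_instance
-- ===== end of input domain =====

-- B replaces A's stateful step-by-step loop with a stateless closed form (output k
-- depends only on A >> 3k) computed in staged passes (objective: alternative, same cost).
-- Both are Python generators; the equivalence is about the list of yielded values.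

-- ===== PORT A =====
-- answer = (2,4,1,7,7,5,0,3,4,0,1,7,5,5,3,0)
def pvAnswer : List Int := [2, 4, 1, 7, 7, 5, 0, 3, 4, 0, 1, 7, 5, 5, 3, 0]

-- update_state(A,B,C); the shift amount B = (A%8)^7 is always in 0..7, so Python's
-- arithmetic '>>' is Lean's '>>> ·.toNat' exactly.
def update_state (A B C : Int) : Int × Int × Int :=
  let B := PySem.Int.mod A 8
  let B := PySem.Int.bxor B 7
  let C := A >>> B.toNat
  let A := A >>> (3 : Nat)
  let B := PySem.Int.bxor B C
  let B := PySem.Int.bxor B 7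
  (A, B, C)

-- A's while-loop: 'index < len(answer)' ↔ the remaining suffix of answer is nonempty,
-- 'answer[index]' is its head; recursion on that suffix is the loop's own termination.
def minimachine3_loop (A B C : Int) (rest : List Int) : List Int :=
  let (A', B', C') := update_state A B C
  let out := PySem.Int.mod B' 8
  match rest with
  | [] => []
  | t :: ts => if out = t then out :: minimachine3_loop A' B' C' ts else []

def minimachine3 (A : Int) (B : Int) (C : Int) : List Int :=
  minimachine3_loop A B C pvAnswer

-- ===== PORT B =====
-- out_at(k): the k-th raw output, a closed form in A and k (no threaded machine state)
def pvOutAt (A : Int) (k : Nat) : Int :=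
  let a := A >>> (3 * k)
  let b := PySem.Int.bxor (PySem.Int.mod a 8) 7
  PySem.Int.mod (PySem.Int.bxor (PySem.Int.bxor b (a >>> b.toNat)) 7) 8

-- n = next((i for i,(o,t) in enumerate(zip(outs, answer)) if o != t), len(answer)):
-- the index of the first mismatching pair, else the number of pairs
def pvFirstMismatch : List (Int × Int) → Nat
  | [] => 0
  | (o, t) :: rest => if o ≠ t then 0 else pvFirstMismatch rest + 1

def minimachine3_alt (A : Int) (B : Int) (C : Int) : List Int :=
  let outs := (List.range pvAnswer.length).map (pvOutAt A)
  outs.take (pvFirstMismatch (outs.zip pvAnswer))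

-- ===== PRECONDITION & SPEC =====
def Spec_minimachine3 (A : Int) (B : Int) (C : Int) (out : List Int) : Prop := out = minimachine3_alt A B C
instance (A : Int) (B : Int) (C : Int) (out : List Int) : Decidable (Spec_minimachine3 A B C out) := by unfold Spec_minimachine3; infer_instance

-- ===== CLAIM (what is proved, stated in full; the proofs are below) =====
def Claim_equal_minimachine3 : Prop := ∀ (A : Int) (B : Int) (C : Int), Dom_minimachine3 A B C → Spec_minimachine3 A B C (minimachine3 A B C)

-- ===== LEMMAS AND PROOFS =====

-- shifting composes: the closed form at index k+1 for A is the closed form at index k for A >> 3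
theorem pvOutAt_succ (A : Int) (k : Nat) : pvOutAt A (k + 1) = pvOutAt (A >>> (3 : Nat)) k := by
  unfold pvOutAt
  rw [show 3 * (k + 1) = 3 + 3 * k from by ring, Int.shiftRight_add]

theorem pvOutAt_zero (A B C : Int) :
    pvOutAt A 0 = PySem.Int.mod (update_state A B C).2.1 8 := by
  simp [pvOutAt, update_state]

-- A's loop, run against any target suffix, equals B's staged computation on that suffix
theorem loop_eq_staged (rest : List Int) : ∀ (A B C : Int),
    minimachine3_loop A B C rest =
      ((List.range rest.length).map (pvOutAt A)).take
        (pvFirstMismatch (((List.range rest.length).map (pvOutAt A)).zip rest)) := by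
  induction rest with
  | nil => intro A B C; rfl
  | cons t ts ih =>
    intro A B C
    rw [minimachine3_loop]
    have hstep : ∀ k, pvOutAt A (k + 1) = pvOutAt (A >>> (3 : Nat)) k := pvOutAt_succ A
    simp only [List.length_cons, List.range_succ_eq_map, List.map_cons, List.map_map,
      List.zip_cons_cons, pvFirstMismatch]
    have hmap : (List.range ts.length).map (pvOutAt A ∘ Nat.succ)
        = (List.range ts.length).map (pvOutAt (A >>> (3 : Nat))) := by
      exact List.map_congr_left (fun k _ => hstep k)
    rw [hmap, ← pvOutAt_zero A B C]
    by_cases h : pvOutAt A 0 = t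
    · simp [update_state, h, ih]
    · simp [h]

-- ===== VERDICT (by name: the statement is the Claim_ definition above) =====
theorem minimachine3_spec : Claim_equal_minimachine3 := by
  intro A B C _
  unfold Spec_minimachine3 minimachine3 minimachine3_alt
  exact loop_eq_staged pvAnswer A B C
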